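-- pv_equiv track=rewrite | github.com/heychhavi/helix-hr-agent | backend/response_handler.py | handle_sequence_feedback
-- ===== SOURCE A (Python) =====
-- def handle_sequence_feedback(feedback: str) -> str:
--     """Handle feedback on the generated sequence and provide appropriate responses."""
--     feedback_lower = feedback.lower()
--
--     # Detect the type of feedback
--     if any(word in feedback_lower for word in ['technical', 'tech', 'stack', 'framework']):
--         return "I'll enhance the technical details. Would you like me to focus on specific technologies or technical challenges?"
--
--     elif any(word in feedback_lower for word in ['specific', 'example', 'concrete']):
--         return "I'll add more specific examples. Should I focus on project examples, technical achievements, or both?"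
--
--     elif any(word in feedback_lower for word in ['tone', 'formal', 'casual', 'friendly']):
--         return "I can adjust the tone. Would you prefer it to be more formal and professional, or more casual and conversational?"
--
--     elif any(word in feedback_lower for word in ['concise', 'shorter', 'brief']):
--         return "I'll make it more concise. Would you like me to focus on shortening specific emails or the entire sequence?"
--
--     elif any(word in feedback_lower for word in ['personal', 'personalize', 'customize']):
--         return "I'll add more personalization. Should I focus on personalizing based on the candidate's background, skills, or potential impact?"
--
--     elif any(word in feedback_lower for word in ['good', 'great', 'perfect', 'works']):
--         return "I'm glad you like the sequence! Feel free to use the magic actions to download it or make any final tweaks."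
--
--     else:
--         return "I'd be happy to improve the sequence. Could you specify what aspects you'd like me to focus on? For example:\n1. Technical details\n2. Specific examples\n3. Tone adjustment\n4. Length/conciseness\n5. Personalization"
-- ===== SOURCE B (Python) =====
-- # Multi-pattern scan: walk the lowercased feedback position by position, testing every
-- # keyword at each position, and keep the smallest (highest-priority) rule index seen.
-- _RESPONSES = [
--     "I'll enhance the technical details. Would you like me to focus on specific technologies or technical challenges?",
--     "I'll add more specific examples. Should I focus on project examples, technical achievements, or both?",
--     "I can adjust the tone. Would you prefer it to be more formal and professional, or more casual and conversational?",
--     "I'll make it more concise. Would you like me to focus on shortening specific emails or the entire sequence?",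
--     "I'll add more personalization. Should I focus on personalizing based on the candidate's background, skills, or potential impact?",
--     "I'm glad you like the sequence! Feel free to use the magic actions to download it or make any final tweaks.",
--     "I'd be happy to improve the sequence. Could you specify what aspects you'd like me to focus on? For example:\n1. Technical details\n2. Specific examples\n3. Tone adjustment\n4. Length/conciseness\n5. Personalization",
-- ]
--
-- _KEYWORDS = [
--     ('technical', 0), ('tech', 0), ('stack', 0), ('framework', 0),
--     ('specific', 1), ('example', 1), ('concrete', 1),
--     ('tone', 2), ('formal', 2), ('casual', 2), ('friendly', 2),
--     ('concise', 3), ('shorter', 3), ('brief', 3),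
--     ('personal', 4), ('personalize', 4), ('customize', 4),
--     ('good', 5), ('great', 5), ('perfect', 5), ('works', 5),
-- ]
--
--
-- def handle_sequence_feedback(feedback: str) -> str:
--     """Single left-to-right scan over character positions; the best (lowest) rule
--     index of any keyword starting at any position decides the response."""
--     fl = feedback.lower()
--     best = 6  # index of the default response
--     for pos in range(len(fl)):
--         for kw, i in _KEYWORDS:
--             if i < best and fl.startswith(kw, pos):
--                 best = i
--     return _RESPONSES[best]
-- ===== Notes on version B (the rewrite author's own statement) =====
-- stated objective: alternative
-- what changed: Replaces the rule-major if/elif chain of substring tests with a position-major multi-pattern scan: one left-to-right walk over the lowercased feedback testing every keyword at each position and keeping the minimal (highest-priority) rule index, which indexes a response table.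
import Mathlib
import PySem

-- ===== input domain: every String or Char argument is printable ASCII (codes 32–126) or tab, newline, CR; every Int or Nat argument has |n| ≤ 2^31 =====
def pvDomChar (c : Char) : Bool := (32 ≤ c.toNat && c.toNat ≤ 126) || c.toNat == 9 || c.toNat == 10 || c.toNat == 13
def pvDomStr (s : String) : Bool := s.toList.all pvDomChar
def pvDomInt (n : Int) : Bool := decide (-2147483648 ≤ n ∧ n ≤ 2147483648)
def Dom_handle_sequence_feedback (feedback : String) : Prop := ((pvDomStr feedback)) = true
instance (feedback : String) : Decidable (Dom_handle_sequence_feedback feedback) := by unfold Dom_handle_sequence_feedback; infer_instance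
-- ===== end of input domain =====

-- B replaces the rule-major if/elif substring tests with a position-major multi-pattern
-- scan keeping the minimal rule index (alternative algorithm, same result).

-- ===== PORT A =====
def handle_sequence_feedback (feedback : String) : String :=
  let feedback_lower := PySem.Str.lower feedback
  if (["technical", "tech", "stack", "framework"] : List String).any (fun word => PySem.Str.isIn word feedback_lower) then
    "I'll enhance the technical details. Would you like me to focus on specific technologies or technical challenges?"
  else if (["specific", "example", "concrete"] : List String).any (fun word => PySem.Str.isIn word feedback_lower) then
    "I'll add more specific examples. Should I focus on project examples, technical achievements, or both?"
  else if (["tone", "formal", "casual", "friendly"] : List String).any (fun word => PySem.Str.isIn word feedback_lower) then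
    "I can adjust the tone. Would you prefer it to be more formal and professional, or more casual and conversational?"
  else if (["concise", "shorter", "brief"] : List String).any (fun word => PySem.Str.isIn word feedback_lower) then
    "I'll make it more concise. Would you like me to focus on shortening specific emails or the entire sequence?"
  else if (["personal", "personalize", "customize"] : List String).any (fun word => PySem.Str.isIn word feedback_lower) then
    "I'll add more personalization. Should I focus on personalizing based on the candidate's background, skills, or potential impact?"
  else if (["good", "great", "perfect", "works"] : List String).any (fun word => PySem.Str.isIn word feedback_lower) then
    "I'm glad you like the sequence! Feel free to use the magic actions to download it or make any final tweaks."
  else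
    "I'd be happy to improve the sequence. Could you specify what aspects you'd like me to focus on? For example:\n1. Technical details\n2. Specific examples\n3. Tone adjustment\n4. Length/conciseness\n5. Personalization"

-- ===== PORT B =====
def pvResponses : List String :=
  [ "I'll enhance the technical details. Would you like me to focus on specific technologies or technical challenges?",
    "I'll add more specific examples. Should I focus on project examples, technical achievements, or both?",
    "I can adjust the tone. Would you prefer it to be more formal and professional, or more casual and conversational?",
    "I'll make it more concise. Would you like me to focus on shortening specific emails or the entire sequence?",
    "I'll add more personalization. Should I focus on personalizing based on the candidate's background, skills, or potential impact?",
    "I'm glad you like the sequence! Feel free to use the magic actions to download it or make any final tweaks.",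
    "I'd be happy to improve the sequence. Could you specify what aspects you'd like me to focus on? For example:\n1. Technical details\n2. Specific examples\n3. Tone adjustment\n4. Length/conciseness\n5. Personalization" ]

def pvKeywords : List (List Char × Nat) :=
  [ ("technical".toList, 0), ("tech".toList, 0), ("stack".toList, 0), ("framework".toList, 0),
    ("specific".toList, 1), ("example".toList, 1), ("concrete".toList, 1),
    ("tone".toList, 2), ("formal".toList, 2), ("casual".toList, 2), ("friendly".toList, 2),
    ("concise".toList, 3), ("shorter".toList, 3), ("brief".toList, 3),
    ("personal".toList, 4), ("personalize".toList, 4), ("customize".toList, 4),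
    ("good".toList, 5), ("great".toList, 5), ("perfect".toList, 5), ("works".toList, 5) ]

-- fl.startswith(kw, pos) with 0 ≤ pos ≤ len(fl) is exactly: kw is a prefix of fl[pos:]
def handle_sequence_feedback_alt (feedback : String) : String :=
  let l := (PySem.Str.lower feedback).toList
  let best := (List.range l.length).foldl
    (fun best pos => pvKeywords.foldl
      (fun best p =>
        if p.2 < best ∧ PySem.Chars.startswith (l.drop pos) p.1 then p.2 else best) best) 6
  pvResponses.getD best ""

-- ===== PRECONDITION & SPEC =====
def Spec_handle_sequence_feedback (feedback : String) (out : String) : Prop := out = handle_sequence_feedback_alt feedback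
instance (feedback : String) (out : String) : Decidable (Spec_handle_sequence_feedback feedback out) := by unfold Spec_handle_sequence_feedback; infer_instance

-- ===== CLAIM (what is proved, stated in full; the proofs are below) =====
def Claim_equal_handle_sequence_feedback : Prop := ∀ (feedback : String), Dom_handle_sequence_feedback feedback → Spec_handle_sequence_feedback feedback (handle_sequence_feedback feedback)

-- ===== LEMMAS AND PROOFS =====

-- the matched-index multiset collected by B's double loop
def pvS (l : List Char) : List Nat :=
  (List.range l.length).flatMap
    (fun pos => (pvKeywords.filter (fun p => PySem.Chars.startswith (l.drop pos) p.1)).map Prod.snd)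

lemma pv_step_eq (l : List Char) (pos : Nat) :
    (fun (b : Nat) (p : List Char × Nat) =>
        if p.2 < b ∧ PySem.Chars.startswith (l.drop pos) p.1 then p.2 else b)
    = fun b p => if PySem.Chars.startswith (l.drop pos) p.1 then min p.2 b else b := by
  funext b p
  by_cases h : PySem.Chars.startswith (l.drop pos) p.1
  · simp only [h, and_true, if_true]
    rw [Nat.min_def]; split_ifs <;> omega
  · simp [h]

lemma pv_foldl_filter_min {α : Type} (c : α → Bool) (g : α → Nat) :
    ∀ (xs : List α) (b : Nat),
      xs.foldl (fun b x => if c x then min (g x) b else b) b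
        = ((xs.filter c).map g).foldl (fun b i => min i b) b := by
  intro xs
  induction xs with
  | nil => intro b; rfl
  | cons x xs ih =>
    intro b
    by_cases h : c x <;> simp [List.filter, h, ih]

lemma pv_foldl_flat {β : Type} (S : β → List Nat) :
    ∀ (ys : List β) (b : Nat),
      ys.foldl (fun b y => (S y).foldl (fun b i => min i b) b) b
        = (ys.flatMap S).foldl (fun b i => min i b) b := by
  intro ys
  induction ys with
  | nil => intro b; rfl
  | cons y ys ih => intro b; simp [List.foldl_append, ih]

lemma pv_minfold_le : ∀ (S : List Nat) (b : Nat),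
    S.foldl (fun b i => min i b) b ≤ b ∧ ∀ i ∈ S, S.foldl (fun b i => min i b) b ≤ i := by
  intro S
  induction S with
  | nil => intro b; simp
  | cons x S ih =>
    intro b
    obtain ⟨h1, h2⟩ := ih (min x b)
    refine ⟨le_trans h1 (by omega), ?_⟩
    intro i hi
    rcases List.mem_cons.mp hi with rfl | hi
    · exact le_trans h1 (by omega)
    · exact h2 i hi
lemma pv_minfold_mem : ∀ (S : List Nat) (b : Nat),
    S.foldl (fun b i => min i b) b = b ∨ S.foldl (fun b i => min i b) b ∈ S := by
  intro S
  induction S with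
  | nil => intro b; simp
  | cons x S ih =>
    intro b
    rcases ih (min x b) with h | h
    · rw [List.foldl_cons, h]
      rcases min_choice x b with h' | h' <;> rw [h']
      · exact Or.inr (List.mem_cons_self)
      · exact Or.inl rfl
    · exact Or.inr (List.mem_cons_of_mem _ h)

lemma pv_kw_ne_nil : ∀ p ∈ pvKeywords, p.1 ≠ [] := by decide

lemma pv_mem_S (l : List Char) (i : Nat) :
    i ∈ pvS l ↔ ∃ p ∈ pvKeywords, p.2 = i ∧ PySem.Chars.isIn p.1 l = true := by
  unfold pvS
  simp only [List.mem_flatMap, List.mem_map, List.mem_filter, List.mem_range]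
  constructor
  · rintro ⟨pos, hpos, p, ⟨hp, hsw⟩, rfl⟩
    refine ⟨p, hp, rfl, ?_⟩
    rw [← PySem.Chars.exists_prefix_drop_iff_isIn]
    exact ⟨pos, (PySem.Chars.startswith_iff _ _).mp hsw⟩
  · rintro ⟨p, hp, rfl, hin⟩
    obtain ⟨j, hj⟩ := (PySem.Chars.exists_prefix_drop_iff_isIn _ _).mpr hin
    have hjlt : j < l.length := by
      by_contra h
      have : l.drop j = [] := List.drop_eq_nil_of_le (by omega)
      rw [this] at hj
      exact pv_kw_ne_nil p hp (List.prefix_nil.mp hj)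
    exact ⟨j, hjlt, p, ⟨hp, (PySem.Chars.startswith_iff _ _).mpr hj⟩, rfl⟩

-- ===== VERDICT (by name: the statement is the Claim_ definition above) =====
set_option maxHeartbeats 1600000 in
theorem handle_sequence_feedback_spec : Claim_equal_handle_sequence_feedback := by
  intro feedback _
  unfold Spec_handle_sequence_feedback handle_sequence_feedback handle_sequence_feedback_alt
  dsimp only
  set l := (PySem.Str.lower feedback).toList with hl
  -- rewrite B's double loop as a min-fold over the matched-index multiset pvS l
  have hfold :
      (List.range l.length).foldl
        (fun best pos => pvKeywords.foldl
          (fun best p =>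
            if p.2 < best ∧ PySem.Chars.startswith (l.drop pos) p.1 then p.2 else best) best) 6
      = (pvS l).foldl (fun b i => min i b) 6 := by
    unfold pvS
    rw [← pv_foldl_flat]
    apply PySem.List.foldl_congr_mem
    intro b pos _
    rw [pv_step_eq, pv_foldl_filter_min]
  rw [hfold]
  set r := (pvS l).foldl (fun b i => min i b) 6 with hr
  obtain ⟨hr6, hrle⟩ := pv_minfold_le (pvS l) 6
  have hrmem := pv_minfold_mem (pvS l) 6
  rw [← hr] at hr6 hrle hrmem
  -- A's branch conditions, at the Chars level
  have hisin : ∀ w : String, PySem.Str.isIn w (PySem.Str.lower feedback)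
      = PySem.Chars.isIn w.toList l := by
    intro w; rw [hl]; simp
  simp only [List.any_cons, List.any_nil, hisin, Bool.or_false]
  -- characterize membership in pvS l as A's six branch conditions
  have hIff : ∀ j : Nat, j ∈ pvS l ↔
      (j = 0 ∧ (PySem.Chars.isIn "technical".toList l || (PySem.Chars.isIn "tech".toList l || (PySem.Chars.isIn "stack".toList l || PySem.Chars.isIn "framework".toList l))) = true) ∨
      (j = 1 ∧ (PySem.Chars.isIn "specific".toList l || (PySem.Chars.isIn "example".toList l || PySem.Chars.isIn "concrete".toList l)) = true) ∨
      (j = 2 ∧ (PySem.Chars.isIn "tone".toList l || (PySem.Chars.isIn "formal".toList l || (PySem.Chars.isIn "casual".toList l || PySem.Chars.isIn "friendly".toList l))) = true) ∨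
      (j = 3 ∧ (PySem.Chars.isIn "concise".toList l || (PySem.Chars.isIn "shorter".toList l || PySem.Chars.isIn "brief".toList l)) = true) ∨
      (j = 4 ∧ (PySem.Chars.isIn "personal".toList l || (PySem.Chars.isIn "personalize".toList l || PySem.Chars.isIn "customize".toList l)) = true) ∨
      (j = 5 ∧ (PySem.Chars.isIn "good".toList l || (PySem.Chars.isIn "great".toList l || (PySem.Chars.isIn "perfect".toList l || PySem.Chars.isIn "works".toList l))) = true) := by
    intro j
    rw [pv_mem_S]
    constructor
    · rintro ⟨p, hp, rfl, hin⟩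
      simp only [pvKeywords, List.mem_cons, List.not_mem_nil, or_false] at hp
      rcases hp with rfl|rfl|rfl|rfl|rfl|rfl|rfl|rfl|rfl|rfl|rfl|rfl|rfl|rfl|rfl|rfl|rfl|rfl|rfl|rfl|rfl <;>
        · simp at hin
          simp [hin]
    · rintro (⟨rfl, h⟩ | ⟨rfl, h⟩ | ⟨rfl, h⟩ | ⟨rfl, h⟩ | ⟨rfl, h⟩ | ⟨rfl, h⟩) <;>
        simp only [Bool.or_eq_true] at h
      · rcases h with h|h|h|h
        · exact ⟨("technical".toList, 0), by decide, rfl, h⟩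
        · exact ⟨("tech".toList, 0), by decide, rfl, h⟩
        · exact ⟨("stack".toList, 0), by decide, rfl, h⟩
        · exact ⟨("framework".toList, 0), by decide, rfl, h⟩
      · rcases h with h|h|h
        · exact ⟨("specific".toList, 1), by decide, rfl, h⟩
        · exact ⟨("example".toList, 1), by decide, rfl, h⟩
        · exact ⟨("concrete".toList, 1), by decide, rfl, h⟩
      · rcases h with h|h|h|h
        · exact ⟨("tone".toList, 2), by decide, rfl, h⟩
        · exact ⟨("formal".toList, 2), by decide, rfl, h⟩
        · exact ⟨("casual".toList, 2), by decide, rfl, h⟩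
        · exact ⟨("friendly".toList, 2), by decide, rfl, h⟩
      · rcases h with h|h|h
        · exact ⟨("concise".toList, 3), by decide, rfl, h⟩
        · exact ⟨("shorter".toList, 3), by decide, rfl, h⟩
        · exact ⟨("brief".toList, 3), by decide, rfl, h⟩
      · rcases h with h|h|h
        · exact ⟨("personal".toList, 4), by decide, rfl, h⟩
        · exact ⟨("personalize".toList, 4), by decide, rfl, h⟩
        · exact ⟨("customize".toList, 4), by decide, rfl, h⟩
      · rcases h with h|h|h|h
        · exact ⟨("good".toList, 5), by decide, rfl, h⟩
        · exact ⟨("great".toList, 5), by decide, rfl, h⟩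
        · exact ⟨("perfect".toList, 5), by decide, rfl, h⟩
        · exact ⟨("works".toList, 5), by decide, rfl, h⟩
  have hCS := fun j => (hIff j).mpr
  have hSC := fun j => (hIff j).mp
  split_ifs with g0 g1 g2 g3 g4 g5
  · have hle := hrle 0 (hCS 0 (Or.inl ⟨rfl, g0⟩))
    rw [show r = 0 by omega]; rfl
  · have hle := hrle 1 (hCS 1 (Or.inr (Or.inl ⟨rfl, g1⟩)))
    have hrk : r = 1 := by
      rcases hrmem with h | h
      · omega
      · rcases hSC r h with ⟨h', hc⟩ | ⟨h', hc⟩ | ⟨h', hc⟩ | ⟨h', hc⟩ | ⟨h', hc⟩ | ⟨h', hc⟩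
        · exact absurd hc g0
        · exact h'
        all_goals omega
    rw [hrk]; rfl
  · have hle := hrle 2 (hCS 2 (Or.inr (Or.inr (Or.inl ⟨rfl, g2⟩))))
    have hrk : r = 2 := by
      rcases hrmem with h | h
      · omega
      · rcases hSC r h with ⟨h', hc⟩ | ⟨h', hc⟩ | ⟨h', hc⟩ | ⟨h', hc⟩ | ⟨h', hc⟩ | ⟨h', hc⟩
        · exact absurd hc g0
        · exact absurd hc g1
        · exact h'
        all_goals omega
    rw [hrk]; rfl
  · have hle := hrle 3 (hCS 3 (Or.inr (Or.inr (Or.inr (Or.inl ⟨rfl, g3⟩)))))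
    have hrk : r = 3 := by
      rcases hrmem with h | h
      · omega
      · rcases hSC r h with ⟨h', hc⟩ | ⟨h', hc⟩ | ⟨h', hc⟩ | ⟨h', hc⟩ | ⟨h', hc⟩ | ⟨h', hc⟩
        · exact absurd hc g0
        · exact absurd hc g1
        · exact absurd hc g2
        · exact h'
        all_goals omega
    rw [hrk]; rfl
  · have hle := hrle 4 (hCS 4 (Or.inr (Or.inr (Or.inr (Or.inr (Or.inl ⟨rfl, g4⟩))))))
    have hrk : r = 4 := by
      rcases hrmem with h | h
      · omega
      · rcases hSC r h with ⟨h', hc⟩ | ⟨h', hc⟩ | ⟨h', hc⟩ | ⟨h', hc⟩ | ⟨h', hc⟩ | ⟨h', hc⟩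
        · exact absurd hc g0
        · exact absurd hc g1
        · exact absurd hc g2
        · exact absurd hc g3
        · exact h'
        · omega
    rw [hrk]; rfl
  · have hle := hrle 5 (hCS 5 (Or.inr (Or.inr (Or.inr (Or.inr (Or.inr ⟨rfl, g5⟩))))))
    have hrk : r = 5 := by
      rcases hrmem with h | h
      · omega
      · rcases hSC r h with ⟨h', hc⟩ | ⟨h', hc⟩ | ⟨h', hc⟩ | ⟨h', hc⟩ | ⟨h', hc⟩ | ⟨h', hc⟩
        · exact absurd hc g0
        · exact absurd hc g1
        · exact absurd hc g2
        · exact absurd hc g3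
        · exact absurd hc g4
        · exact h'
    rw [hrk]; rfl
  · have hrk : r = 6 := by
      rcases hrmem with h | h
      · exact h
      · rcases hSC r h with ⟨h', hc⟩ | ⟨h', hc⟩ | ⟨h', hc⟩ | ⟨h', hc⟩ | ⟨h', hc⟩ | ⟨h', hc⟩
        · exact absurd hc g0
        · exact absurd hc g1
        · exact absurd hc g2
        · exact absurd hc g3
        · exact absurd hc g4
        · exact absurd hc g5
    rw [hrk]; rfl
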